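-- pv_equiv track=rewrite | github.com/ultimate-pa/hanfor | hanfor/data_migration/my_unpickler.py | calculate_req_id_occurrence
-- ===== SOURCE A (Python) =====
-- def calculate_req_id_occurrence(requirement_file: str, selected_requirements: list[str]) -> list[tuple[str, int]]:
--     req: dict[str, tuple[str, int]] = {}
--     for req_id in selected_requirements:
--         req[req_id.replace("-", "_") + "_"] = (req_id, 0)
--     for line in requirement_file.split("\n"):
--         if line.startswith("INPUT") or line.startswith("CONST") or line == "":
--             continue
--         for req_id_formatted in req:
--             if line.startswith(req_id_formatted):
--                 req[req_id_formatted] = (req[req_id_formatted][0], req[req_id_formatted][1] + 1)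
--                 continue
--
--     requirements: list[(str, int)] = []
--     for req_id_formatted in req:
--         requirements.append(req[req_id_formatted])
--     return requirements
-- ===== SOURCE B (Python) =====
-- def calculate_req_id_occurrence(requirement_file: str, selected_requirements: list[str]) -> list[tuple[str, int]]:
--     # loop interchange: filter the relevant lines once, then count matches per formatted id
--     ids_by_prefix: dict[str, str] = {}
--     for req_id in selected_requirements:
--         ids_by_prefix[req_id.replace("-", "_") + "_"] = req_id
--     lines = [line for line in requirement_file.split("\n")
--              if line and not line.startswith(("INPUT", "CONST"))]
--     return [(req_id, sum(1 for line in lines if line.startswith(prefix)))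
--             for prefix, req_id in ids_by_prefix.items()]
-- ===== Notes on version B (the rewrite author's own statement) =====
-- stated objective: alternative
-- what changed: Loop interchange: instead of mutating a counts dict while scanning every formatted id for every line, B filters the relevant lines once and then, per formatted id, counts the lines starting with it.
import Mathlib
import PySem

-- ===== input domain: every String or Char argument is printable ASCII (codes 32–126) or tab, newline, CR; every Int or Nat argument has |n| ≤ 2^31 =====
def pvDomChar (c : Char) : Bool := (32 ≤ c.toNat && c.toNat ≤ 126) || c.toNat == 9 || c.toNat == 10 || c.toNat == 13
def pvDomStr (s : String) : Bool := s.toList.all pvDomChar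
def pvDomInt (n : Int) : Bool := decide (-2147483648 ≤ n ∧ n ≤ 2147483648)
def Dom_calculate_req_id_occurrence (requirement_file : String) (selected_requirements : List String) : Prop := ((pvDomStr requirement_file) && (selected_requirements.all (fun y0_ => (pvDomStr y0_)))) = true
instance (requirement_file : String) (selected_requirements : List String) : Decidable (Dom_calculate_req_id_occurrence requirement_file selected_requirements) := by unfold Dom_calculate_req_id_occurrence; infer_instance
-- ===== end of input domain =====

-- B replaces A's per-line scan that mutates a counts dict with a loop interchange:
-- filter the relevant lines once, then count the matching lines per formatted id (alternative; no speed claim).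

-- ===== PORT A =====
def calculate_req_id_occurrence (requirement_file : String) (selected_requirements : List String) : List (String × Int) :=
  let req : PySem.Dict String (String × Int) :=
    selected_requirements.foldl
      (fun d req_id => d.insert (PySem.Str.replace req_id "-" "_" ++ "_") (req_id, 0))
      PySem.Dict.empty
  let req :=
    ((PySem.Str.split? requirement_file "\n").getD []).foldl
      (fun d line =>
        if PySem.Str.startswith line "INPUT" || PySem.Str.startswith line "CONST" || line == "" then
          d
        else
          d.keys.foldl
            (fun d' req_id_formatted =>
              if PySem.Str.startswith line req_id_formatted then
                d'.modify req_id_formatted ("", 0) (fun p => (p.1, p.2 + 1))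
              else d')
            d)
      req
  req.keys.foldl (fun acc req_id_formatted => acc ++ [req.getD req_id_formatted ("", 0)]) []

-- ===== PORT B =====
def calculate_req_id_occurrence_alt (requirement_file : String) (selected_requirements : List String) : List (String × Int) :=
  let idsByPrefix : PySem.Dict String String :=
    selected_requirements.foldl
      (fun d req_id => d.insert (PySem.Str.replace req_id "-" "_" ++ "_") req_id)
      PySem.Dict.empty
  let lines :=
    ((PySem.Str.split? requirement_file "\n").getD []).filter
      (fun line => !(line == "") && !(PySem.Str.startswith line "INPUT") && !(PySem.Str.startswith line "CONST"))
  idsByPrefix.items.map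
    (fun p => (p.2, ((lines.countP (fun line => PySem.Str.startswith line p.1)) : Int)))

-- ===== PRECONDITION & SPEC =====
def Spec_calculate_req_id_occurrence (requirement_file : String) (selected_requirements : List String) (out : List (String × Int)) : Prop := out = calculate_req_id_occurrence_alt requirement_file selected_requirements
instance (requirement_file : String) (selected_requirements : List String) (out : List (String × Int)) : Decidable (Spec_calculate_req_id_occurrence requirement_file selected_requirements out) := by unfold Spec_calculate_req_id_occurrence; infer_instance

-- ===== CLAIM (what is proved, stated in full; the proofs are below) =====
def Claim_equal_calculate_req_id_occurrence : Prop := ∀ (requirement_file : String) (selected_requirements : List String), Dom_calculate_req_id_occurrence requirement_file selected_requirements → Spec_calculate_req_id_occurrence requirement_file selected_requirements (calculate_req_id_occurrence requirement_file selected_requirements)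

-- ===== LEMMAS AND PROOFS =====

-- A's skip condition is the negation of B's keep condition (pure Bool fact).
lemma pvSkipKeep : ∀ a b c : Bool, (a || b || c) = !(!c && !a && !b) := by decide

-- L1: the two building folds produce item lists related by the pairing map
lemma pvBuild (sels : List String) (dA : PySem.Dict String (String × Int)) (dB : PySem.Dict String String)
    (h : dA.items = dB.items.map (fun p => (p.1, (p.2, (0 : Int))))) :
    (sels.foldl (fun d req_id => d.insert (PySem.Str.replace req_id "-" "_" ++ "_") (req_id, 0)) dA).items
      = (sels.foldl (fun d req_id => d.insert (PySem.Str.replace req_id "-" "_" ++ "_") req_id) dB).items.map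
          (fun p => (p.1, (p.2, (0 : Int)))) := by
  induction sels generalizing dA dB with
  | nil => simpa using h
  | cons rid rest ih =>
    simp only [List.foldl_cons]
    apply ih
    have hkeys : dA.keys = dB.keys := by simp [PySem.Dict.keys, h, Function.comp]
    have hc : dA.contains (PySem.Str.replace rid "-" "_" ++ "_") = dB.contains (PySem.Str.replace rid "-" "_" ++ "_") := by
      rw [PySem.Dict.contains_eq_decide_mem_keys, PySem.Dict.contains_eq_decide_mem_keys, hkeys]
    by_cases hb : dB.contains (PySem.Str.replace rid "-" "_" ++ "_") = true
    · rw [PySem.Dict.items_insert_of_contains _ _ (hc ▸ hb), PySem.Dict.items_insert_of_contains _ _ hb, h]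
      simp only [List.map_map]
      apply List.map_congr_left
      intro p _
      by_cases hpk : p.1 = PySem.Str.replace rid "-" "_" ++ "_" <;> simp [hpk, Function.comp]
    · have ha : dA.contains (PySem.Str.replace rid "-" "_" ++ "_") = false := by
        rw [hc]; simpa using hb
      rw [PySem.Dict.items_insert_of_not_contains _ _ ha,
          PySem.Dict.items_insert_of_not_contains _ _ (by simpa using hb), h]
      simp

-- L3: the inner loop over a nodup list of existing keys bumps exactly the matching entries
lemma pvInner (line : String) (ks : List String) (d : PySem.Dict String (String × Int))
    (hnd : d.keys.Nodup) (hks : ks.Nodup) (hsub : ∀ k ∈ ks, k ∈ d.keys) :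
    (ks.foldl (fun d' k => if PySem.Str.startswith line k then d'.modify k ("", 0) (fun p => (p.1, p.2 + 1)) else d') d).items
      = d.items.map (fun p => if p.1 ∈ ks ∧ PySem.Str.startswith line p.1 = true then (p.1, (p.2.1, p.2.2 + 1)) else p) := by
  induction ks generalizing d with
  | nil => simp
  | cons k rest ih =>
    simp only [List.foldl_cons]
    have hkmem : k ∈ d.keys := hsub k (by simp)
    have hkc : d.contains k = true := by
      rw [PySem.Dict.contains_eq_decide_mem_keys]; simpa using hkmem
    by_cases hsw : PySem.Str.startswith line k = true
    · rw [if_pos hsw]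
      have hitems : (d.modify k ("", 0) (fun p => (p.1, p.2 + 1))).items
          = d.items.map (fun p => if p.1 == k then (k, (d.getD k ("", 0)).1, (d.getD k ("", 0)).2 + 1) else p) := by
        show (d.insert k _).items = _
        rw [PySem.Dict.items_insert_of_contains _ _ hkc]
      have hkeys : (d.modify k ("", 0) (fun p => (p.1, p.2 + 1))).keys = d.keys := by
        simp only [PySem.Dict.keys, hitems, List.map_map]
        apply List.map_congr_left
        intro p _
        by_cases hpk : p.1 = k <;> simp [hpk, Function.comp]
      rw [ih _ (hkeys ▸ hnd) hks.of_cons (fun j hj => hkeys ▸ hsub j (by simp [hj]))]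
      rw [hitems, List.map_map]
      apply List.map_congr_left
      intro p hp
      simp only [PySem.Str.startswith_eq] at hsw
      by_cases hpk : p.1 = k
      · have hget : d.getD k ("", 0) = p.2 :=
          PySem.Dict.getD_of_mem_items d (k := k) (v := p.2) (by rw [← hpk]; exact hp) hnd ("", 0)
        have hknr : k ∉ rest := (List.nodup_cons.mp hks).1
        simp [Function.comp, hpk, hget, hknr, hsw]
      · have hbeq : (p.1 == k) = false := by simpa using hpk
        simp only [Function.comp, hbeq, Bool.false_eq_true, if_false]
        by_cases hpr : p.1 ∈ rest
        · simp [hpr, hpk]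
        · simp [hpr, hpk]
    · rw [if_neg hsw]
      rw [ih _ hnd hks.of_cons (fun j hj => hsub j (by simp [hj]))]
      apply List.map_congr_left
      intro p _
      simp only [PySem.Str.startswith_eq] at hsw
      by_cases hpk : p.1 = k
      · simp [hpk, hsw]
      · simp [hpk]

-- L2: the whole line loop adds, to each entry, the count of kept lines starting with its key
lemma pvLines (lines : List String) (d : PySem.Dict String (String × Int)) (hnd : d.keys.Nodup) :
    (lines.foldl (fun d line =>
        if PySem.Str.startswith line "INPUT" || PySem.Str.startswith line "CONST" || line == "" then d
        else d.keys.foldl (fun d' k => if PySem.Str.startswith line k then d'.modify k ("", 0) (fun p => (p.1, p.2 + 1)) else d') d) d).items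
      = d.items.map (fun p => (p.1, (p.2.1, p.2.2 +
          (((lines.filter (fun line => !(line == "") && !(PySem.Str.startswith line "INPUT") && !(PySem.Str.startswith line "CONST"))).countP
              (fun line => PySem.Str.startswith line p.1)) : Int)))) := by
  induction lines generalizing d with
  | nil => simp
  | cons l ls ih =>
    simp only [List.foldl_cons]
    rw [pvSkipKeep]
    by_cases hv : (!(l == "") && !(PySem.Str.startswith l "INPUT") && !(PySem.Str.startswith l "CONST")) = true
    · have hfilter : (l :: ls).filter (fun line => !(line == "") && !(PySem.Str.startswith line "INPUT") && !(PySem.Str.startswith line "CONST"))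
          = l :: ls.filter (fun line => !(line == "") && !(PySem.Str.startswith line "INPUT") && !(PySem.Str.startswith line "CONST")) := by
        rw [List.filter_cons]
        rw [hv]
        rfl
      rw [hv, hfilter]
      simp only [Bool.not_true, Bool.false_eq_true, if_false]
      have hin := pvInner l d.keys d hnd hnd (fun k hk => hk)
      set d' := d.keys.foldl (fun d' k => if PySem.Str.startswith l k then d'.modify k ("", 0) (fun p => (p.1, p.2 + 1)) else d') d with hd'
      have hkeys : d'.keys = d.keys := by
        show d'.items.map (fun p => p.1) = d.items.map (fun p => p.1)
        rw [hin, List.map_map]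
        apply List.map_congr_left
        intro p _
        by_cases h1 : p.1 ∈ d.keys ∧ PySem.Str.startswith l p.1 = true
        · rw [Function.comp_apply, if_pos h1]
        · rw [Function.comp_apply, if_neg h1]
      rw [ih d' (hkeys ▸ hnd), hin, List.map_map]
      apply List.map_congr_left
      intro p hp
      have hpk : p.1 ∈ d.keys := PySem.Dict.mem_keys_of_mem_items d hp
      rw [Function.comp_apply]
      by_cases hsw : PySem.Str.startswith l p.1 = true
      · rw [if_pos ⟨hpk, hsw⟩, List.countP_cons, if_pos hsw]
        refine Prod.ext rfl (Prod.ext rfl ?_)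
        push_cast
        ring
      · rw [if_neg (by intro h; exact hsw h.2), List.countP_cons, if_neg hsw]
        simp
    · rw [Bool.not_eq_true] at hv
      have hfilter : (l :: ls).filter (fun line => !(line == "") && !(PySem.Str.startswith line "INPUT") && !(PySem.Str.startswith line "CONST"))
          = ls.filter (fun line => !(line == "") && !(PySem.Str.startswith line "INPUT") && !(PySem.Str.startswith line "CONST")) := by
        rw [List.filter_cons]
        rw [hv]
        rfl
      rw [hv, hfilter]
      simp only [Bool.not_false, if_true]
      exact ih d hnd

-- the output loop of A collects the values, which are items.map (·.2)
lemma pvOut (d : PySem.Dict String (String × Int)) (hnd : d.keys.Nodup) :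
    d.keys.foldl (fun acc k => acc ++ [d.getD k ("", 0)]) [] = d.items.map (·.2) := by
  rw [PySem.List.foldl_append_singleton_eq_map]
  rw [← PySem.Dict.values_eq_map_keys d hnd ("", 0)]
  rfl

-- ===== VERDICT (by name: the statement is the Claim_ definition above) =====
theorem calculate_req_id_occurrence_spec : Claim_equal_calculate_req_id_occurrence := by
  intro rf sels _
  unfold Spec_calculate_req_id_occurrence calculate_req_id_occurrence calculate_req_id_occurrence_alt
  dsimp only
  set dA0 : PySem.Dict String (String × Int) := sels.foldl (fun d req_id => d.insert (PySem.Str.replace req_id "-" "_" ++ "_") (req_id, 0)) PySem.Dict.empty with hdA0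
  set dB0 := sels.foldl (fun d req_id => d.insert (PySem.Str.replace req_id "-" "_" ++ "_") req_id) PySem.Dict.empty with hdB0
  set lines := (PySem.Str.split? rf "\n").getD [] with hlines
  have hrel : dA0.items = dB0.items.map (fun p => (p.1, (p.2, (0 : Int)))) :=
    pvBuild sels PySem.Dict.empty PySem.Dict.empty (by rfl)
  have hndA : dA0.keys.Nodup :=
    PySem.Dict.nodup_keys_foldl_insert_key sels (fun req_id => PySem.Str.replace req_id "-" "_" ++ "_")
      (fun _ req_id => (req_id, (0 : Int))) PySem.Dict.empty (PySem.Dict.nodup_keys_empty)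
  have hlin := pvLines lines dA0 hndA
  set dF := lines.foldl (fun d line =>
      if PySem.Str.startswith line "INPUT" || PySem.Str.startswith line "CONST" || line == "" then d
      else d.keys.foldl (fun d' k => if PySem.Str.startswith line k then d'.modify k ("", 0) (fun p => (p.1, p.2 + 1)) else d') d) dA0 with hdF
  have hkeysF : dF.keys = dA0.keys := by
    show dF.items.map (fun p => p.1) = dA0.items.map (fun p => p.1)
    rw [hlin, List.map_map]
    rfl
  rw [pvOut dF (hkeysF ▸ hndA), hlin, hrel]
  simp only [List.map_map]
  apply List.map_congr_left
  intro p _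
  simp [Function.comp]
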